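-- pv_equiv track=rewrite | github.com/aran-tia/python-start | day23_problem3.py | even_min_max
-- ===== SOURCE A (Python) =====
-- def even_min_max(numbers):
--
--     max_num = None
--     min_num = None
--
--     for n in numbers:
--         if n % 2 == 0:
--             if max_num is None or n > max_num:
--                 max_num = n
--             if min_num is None or n < min_num:
--                 min_num = n
--     return max_num, min_num
-- ===== SOURCE B (Python) =====
-- def even_min_max(numbers):
--     evens = [n for n in numbers if n % 2 == 0]
--     if not evens:
--         return None, None
--     return max(evens), min(evens)
-- ===== Notes on version B (the rewrite author's own statement) =====
-- stated objective: simpler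
-- what changed: Replaces the single-pass incremental tracking of two optional extrema with a build-then-reduce decomposition: filter the evens once, then apply built-in max/min (with an explicit empty guard).
import Mathlib
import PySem

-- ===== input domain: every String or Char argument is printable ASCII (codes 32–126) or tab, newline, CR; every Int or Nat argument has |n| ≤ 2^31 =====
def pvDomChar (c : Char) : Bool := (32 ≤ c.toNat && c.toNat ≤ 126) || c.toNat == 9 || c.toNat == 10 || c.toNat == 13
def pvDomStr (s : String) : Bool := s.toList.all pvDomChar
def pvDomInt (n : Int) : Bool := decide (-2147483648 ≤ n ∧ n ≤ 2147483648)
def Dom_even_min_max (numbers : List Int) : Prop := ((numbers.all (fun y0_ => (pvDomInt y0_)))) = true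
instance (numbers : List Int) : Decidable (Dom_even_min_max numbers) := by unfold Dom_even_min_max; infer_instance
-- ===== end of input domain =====

-- B replaces A's single-pass incremental tracking with filter-then-max/min; objective: simpler.

-- ===== PORT A =====
-- one iteration of A's loop body on the state (max_num, min_num)
def evenMinMaxStep (st : Option Int × Option Int) (n : Int) : Option Int × Option Int :=
  if PySem.Int.mod n 2 == 0 then
    let mx := match st.1 with
      | none => some n
      | some m => if n > m then some n else some m
    let mn := match st.2 with
      | none => some n
      | some m => if n < m then some n else some m
    (mx, mn)
  else st

def even_min_max (numbers : List Int) : Option Int × Option Int :=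
  numbers.foldl evenMinMaxStep (none, none)

-- ===== PORT B =====
def even_min_max_alt (numbers : List Int) : Option Int × Option Int :=
  let evens := numbers.filter (fun n => PySem.Int.mod n 2 == 0)
  if evens = [] then (none, none)
  else (PySem.List.max? evens (fun y => y), PySem.List.min? evens (fun y => y))

-- ===== PRECONDITION & SPEC =====
def Spec_even_min_max (numbers : List Int) (out : Option Int × Option Int) : Prop := out = even_min_max_alt numbers
instance (numbers : List Int) (out : Option Int × Option Int) : Decidable (Spec_even_min_max numbers out) := by unfold Spec_even_min_max; infer_instance

-- ===== CLAIM (what is proved, stated in full; the proofs are below) =====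
def Claim_equal_even_min_max : Prop := ∀ (numbers : List Int), Dom_even_min_max numbers → Spec_even_min_max numbers (even_min_max numbers)

-- ===== LEMMAS AND PROOFS =====

theorem fold_some (xs : List Int) : ∀ (a b : Int),
    xs.foldl evenMinMaxStep (some a, some b) =
      (some ((xs.filter (fun n => PySem.Int.mod n 2 == 0)).foldl max a),
       some ((xs.filter (fun n => PySem.Int.mod n 2 == 0)).foldl min b)) := by
  induction xs with
  | nil => intro a b; simp
  | cons n t ih =>
    intro a b
    by_cases h : PySem.Int.mod n 2 == 0
    · have h2 : (2:Int) ∣ n := (PySem.Int.mod_eq_zero_iff_dvd n 2).mp (by simpa using h)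
      have hmax : (if n > a then some n else some a) = some (max a n) := by
        split_ifs with hc <;> simp <;> omega
      have hmin : (if n < b then some n else some b) = some (min b n) := by
        split_ifs with hc <;> simp <;> omega
      simp [List.foldl, evenMinMaxStep, h2, hmax, hmin, ih]
    · have h2 : ¬ (2:Int) ∣ n := fun hd => h (by simpa using (PySem.Int.mod_eq_zero_iff_dvd n 2).mpr hd)
      simp [List.foldl, evenMinMaxStep, h2, ih]

theorem fold_none (xs : List Int) :
    xs.foldl evenMinMaxStep (none, none) =
      (match xs.filter (fun n => PySem.Int.mod n 2 == 0) with
       | [] => (none, none)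
       | h :: t => (some (t.foldl max h), some (t.foldl min h))) := by
  induction xs with
  | nil => simp
  | cons n t ih =>
    by_cases h : (2:Int) ∣ n
    · simp [List.foldl, evenMinMaxStep, h, fold_some]
    · simp [List.foldl, evenMinMaxStep, h, ih]

-- ===== VERDICT (by name: the statement is the Claim_ definition above) =====
theorem even_min_max_spec : Claim_equal_even_min_max := by
  intro numbers _
  unfold Spec_even_min_max even_min_max even_min_max_alt
  rw [fold_none]
  cases hf : numbers.filter (fun n => PySem.Int.mod n 2 == 0) with
  | nil => simp
  | cons h t =>
    simp [PySem.List.max?_id_cons, PySem.List.min?_id_cons]
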